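-- pv_equiv track=rewrite | github.com/DrDanicka/trading_strategy_tester | trading_strategy_tester/training_data/training_data.py | build_logical_expression
-- ===== SOURCE A (Python) =====
-- def build_logical_expression(ops, words):
--     and_groups = []
--     current_group = [words[0]]
--
--     for i, op in enumerate(ops):
--         if op == "and":
--             current_group.append(words[i + 1])
--         else:  # "or"
--             and_groups.append(current_group if len(current_group) > 1 else current_group[0])
--             current_group = [words[i + 1]]
--
--     and_groups.append(current_group if len(current_group) > 1 else current_group[0])
--
--     # Construct the formatted logical expression
--     if len(and_groups) == 1:
--         structured_expression = (
--             f"AND({', '.join(and_groups[0])})" if isinstance(and_groups[0], list) else and_groups[0]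
--         )
--     else:
--         structured_expression = f"OR({', '.join(['AND(' + ', '.join(group) + ')' if isinstance(group, list) else group for group in and_groups])})"
--
--     # Construct the simple concatenation expression
--     simple_expression = " ".join(word if i == 0 else f"{ops[i-1]} {word}" for i, word in enumerate(words))
--
--     return structured_expression, simple_expression
-- ===== SOURCE B (Python) =====
-- def build_logical_expression(ops, words):
--     # split points: indices whose op is not "and" (A treats any such op as "or")
--     bounds = [0] + [i + 1 for i, op in enumerate(ops) if op != "and"] + [len(words)]
--     groups = [words[a:b] for a, b in zip(bounds, bounds[1:])]
--
--     def fmt(g):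
--         return f"AND({', '.join(g)})" if len(g) > 1 else g[0]
--
--     if len(groups) == 1:
--         structured_expression = fmt(groups[0])
--     else:
--         structured_expression = f"OR({', '.join(fmt(g) for g in groups)})"
--
--     parts = [words[0]]
--     for op, word in zip(ops, words[1:]):
--         parts.append(op)
--         parts.append(word)
--     simple_expression = " ".join(parts)
--
--     return structured_expression, simple_expression
-- ===== Notes on version B (the rewrite author's own statement) =====
-- stated objective: simpler
-- what changed: B replaces A's stateful group accumulator holding a mixed list-or-string payload by computing the 'or' split indices once, slicing words into uniform and-groups, formatting with a single group formatter, and building the simple expression by zip-interleaving instead of index arithmetic over enumerate(words).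
import Mathlib
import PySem

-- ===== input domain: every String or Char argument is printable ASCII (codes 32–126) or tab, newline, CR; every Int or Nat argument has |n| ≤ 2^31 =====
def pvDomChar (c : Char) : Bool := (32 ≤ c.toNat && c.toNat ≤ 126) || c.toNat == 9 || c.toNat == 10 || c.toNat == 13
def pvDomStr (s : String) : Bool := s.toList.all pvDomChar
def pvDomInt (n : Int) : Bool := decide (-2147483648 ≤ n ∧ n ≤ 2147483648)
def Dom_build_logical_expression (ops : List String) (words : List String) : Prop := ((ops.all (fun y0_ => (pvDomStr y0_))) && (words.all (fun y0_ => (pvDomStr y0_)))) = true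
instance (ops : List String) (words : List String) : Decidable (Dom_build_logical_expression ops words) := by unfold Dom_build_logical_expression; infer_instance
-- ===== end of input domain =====

-- B rebuilds the expressions from or-split indices and uniform word slices instead of A's
-- mixed list-or-string accumulator; objective: simpler. Equivalence is proved on Pre_ below.

-- ===== PORT A =====
-- A stores in and_groups either a list (len > 1) or the bare word: Sum.inl = list, Sum.inr = str.
def pvEncGroup (g : List String) : List String ⊕ String :=
  if g.length > 1 then Sum.inl g else Sum.inr (PySem.List.pyGetD g 0 "")

-- the f-string / isinstance rendering used in both branches of A's formatting
def pvRenderGroup (g : List String ⊕ String) : String :=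
  match g with
  | Sum.inl l => PySem.Str.join "" ["AND(", PySem.Str.join ", " l, ")"]
  | Sum.inr s => s

-- loop body of A's `for i, op in enumerate(ops)`
def pvStepA (words : List String) (st : List (List String ⊕ String) × List String)
    (p : Int × String) : List (List String ⊕ String) × List String :=
  if p.2 == "and" then
    (st.1, st.2 ++ [PySem.List.pyGetD words (p.1 + 1) ""])
  else
    (st.1 ++ [pvEncGroup st.2], [PySem.List.pyGetD words (p.1 + 1) ""])

def build_logical_expression (ops : List String) (words : List String) : String × String :=
  let st := (PySem.List.enumerate ops 0).foldl (pvStepA words) ([], [PySem.List.pyGetD words 0 ""])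
  let and_groups := st.1 ++ [pvEncGroup st.2]
  let structured :=
    if and_groups.length == 1 then
      pvRenderGroup (and_groups.headD (Sum.inr ""))
    else
      PySem.Str.join "" ["OR(", PySem.Str.join ", " (and_groups.map pvRenderGroup), ")"]
  let simple :=
    PySem.Str.join " " ((PySem.List.enumerate words 0).map (fun p =>
      if p.1 == 0 then p.2 else PySem.Str.join " " [PySem.List.pyGetD ops (p.1 - 1) "", p.2]))
  (structured, simple)

-- ===== PORT B =====
-- B's single group formatter: AND(...) only for groups of 2 or more, else the bare word.
def pvFmtGroup (g : List String) : String :=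
  if g.length > 1 then PySem.Str.join "" ["AND(", PySem.Str.join ", " g, ")"]
  else PySem.List.pyGetD g 0 ""

def build_logical_expression_alt (ops : List String) (words : List String) : String × String :=
  let bounds : List Int :=
    [0] ++ (PySem.List.enumerate ops 0).filterMap
            (fun p => if p.2 != "and" then some (p.1 + 1) else none)
        ++ [PySem.List.len words]
  let groups := (bounds.zip bounds.tail).map
    (fun q => PySem.List.slice words (some q.1) (some q.2))
  let structured :=
    if groups.length == 1 then pvFmtGroup (groups.headD [])
    else PySem.Str.join "" ["OR(", PySem.Str.join ", " (groups.map pvFmtGroup), ")"]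
  let parts := (ops.zip words.tail).foldl
    (fun acc q => acc ++ [q.1, q.2]) [PySem.List.pyGetD words 0 ""]
  (structured, PySem.Str.join " " parts)

-- ===== PRECONDITION & SPEC =====
-- A raises IndexError unless words has exactly one more element than ops (words[i+1] in the
-- group loop needs len(words) ≥ len(ops)+1, ops[i-1] in the join needs len(ops) ≥ len(words)-1,
-- and words[0] needs words nonempty); Pre_ admits exactly the inputs where A returns.
def Pre_build_logical_expression (ops : List String) (words : List String) : Prop :=
  words.length = ops.length + 1
instance (ops : List String) (words : List String) : Decidable (Pre_build_logical_expression ops words) := by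
  unfold Pre_build_logical_expression; infer_instance

def pvWitness_build_logical_expression : List String × List String :=
  (["and", "or", "and"], ["a", "b", "c", "d"])

def Spec_build_logical_expression (ops : List String) (words : List String) (out : String × String) : Prop := out = build_logical_expression_alt ops words
instance (ops : List String) (words : List String) (out : String × String) : Decidable (Spec_build_logical_expression ops words out) := by unfold Spec_build_logical_expression; infer_instance

-- ===== CLAIM (what is proved, stated in full; the proofs are below) =====
def Claim_equal_build_logical_expression : Prop := ∀ (ops : List String) (words : List String), Dom_build_logical_expression ops words → Pre_build_logical_expression ops words → Spec_build_logical_expression ops words (build_logical_expression ops words)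


-- ===== LEMMAS AND PROOFS =====

-- reference decomposition of words into and-groups (cur = current group)
def pvRefGroups (cur : List String) : List String → List String → List (List String)
  | [], _ => [cur]
  | _ :: _, [] => [cur]
  | op :: ops, w :: ws =>
    if op = "and" then pvRefGroups (cur ++ [w]) ops ws else cur :: pvRefGroups [w] ops ws

-- indices of the non-"and" ops
def pvRefSplits : List String → List Nat
  | [] => []
  | op :: ops =>
    if op = "and" then (pvRefSplits ops).map (· + 1) else 0 :: (pvRefSplits ops).map (· + 1)

-- consecutive slices between bounds
def pvSliceGroups (full : List String) : Int → List Int → List (List String)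
  | _, [] => []
  | a, b :: bs => PySem.List.slice full (some a) (some b) :: pvSliceGroups full b bs

lemma pvRender_enc (g : List String) : pvRenderGroup (pvEncGroup g) = pvFmtGroup g := by
  unfold pvRenderGroup pvEncGroup pvFmtGroup; split_ifs <;> rfl

lemma pvA_fold (ops : List String) : ∀ (ws full : List String) (s : Nat)
    (acc : List (List String ⊕ String)) (cur : List String),
    ws.length = ops.length → full.drop (s + 1) = ws →
    (((PySem.List.enumerate ops (s : Int)).foldl (pvStepA full) (acc, cur)).1
      ++ [pvEncGroup (((PySem.List.enumerate ops (s : Int)).foldl (pvStepA full) (acc, cur)).2)])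
    = acc ++ (pvRefGroups cur ops ws).map pvEncGroup := by
  induction ops with
  | nil =>
    intro ws full s acc cur hl hd
    cases ws with
    | nil => simp [PySem.List.enumerate, pvRefGroups]
    | cons w ws => simp at hl
  | cons op ops ih =>
    intro ws full s acc cur hl hd
    cases ws with
    | nil => simp at hl
    | cons w ws =>
      have hl' : ws.length = ops.length := by simpa using hl
      have hw : PySem.List.pyGetD full ((s : Int) + 1) "" = w := by
        have hcast : (s : Int) + 1 = ((s + 1 : Nat) : Int) := by push_cast; ring
        rw [hcast, PySem.List.pyGetD_natCast]
        have h0 : full[s + 1]? = some w := by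
          have h1 : (full.drop (s + 1))[0]? = full[s + 1 + 0]? := List.getElem?_drop
          rw [hd] at h1
          simpa using h1.symm
        simp [List.getD_eq_getElem?_getD, h0]
      have hd' : full.drop (s + 1 + 1) = ws := by
        have : full.drop (s + 1 + 1) = (full.drop (s + 1)).drop 1 := by
          rw [List.drop_drop]
        rw [this, hd]
        rfl
      rw [PySem.List.enumerate_cons]
      simp only [List.foldl_cons]
      have hcast : (s : Int) + 1 = ((s + 1 : Nat) : Int) := by push_cast; ring
      by_cases hop : op = "and"
      · subst hop
        have hstep : pvStepA full (acc, cur) ((s : Int), "and")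
            = (acc, cur ++ [w]) := by
          simp [pvStepA, hw]
        rw [hstep, hcast, ih ws full (s + 1) acc (cur ++ [w]) hl' hd']
        simp [pvRefGroups]
      · have hstep : pvStepA full (acc, cur) ((s : Int), op)
            = (acc ++ [pvEncGroup cur], [w]) := by
          simp [pvStepA, hop, hw]
        rw [hstep, hcast, ih ws full (s + 1) (acc ++ [pvEncGroup cur]) [w] hl' hd']
        simp [pvRefGroups, hop]

lemma pvB_filterMap (ops : List String) : ∀ (s : Nat),
    (PySem.List.enumerate ops (s : Int)).filterMap
      (fun p => if p.2 != "and" then some (p.1 + 1) else none)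
    = (pvRefSplits ops).map (fun k => ((s + k + 1 : Nat) : Int)) := by
  induction ops with
  | nil => intro s; rfl
  | cons op ops ih =>
    intro s
    rw [PySem.List.enumerate_cons]
    have hcast : (s : Int) + 1 = ((s + 1 : Nat) : Int) := by push_cast; ring
    by_cases hop : op = "and"
    · subst hop
      have hf : (fun p : Int × String => if (p.2 != "and") = true then some (p.1 + 1) else none)
          ((s : Int), "and") = none := by simp
      rw [List.filterMap_cons]
      simp only [hf]
      rw [hcast, ih (s + 1)]
      simp only [pvRefSplits, if_true, List.map_map]
      apply List.map_congr_left
      intro k _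
      simp only [Function.comp_apply]
      congr 1
      omega
    · have hf : (fun p : Int × String => if (p.2 != "and") = true then some (p.1 + 1) else none)
          ((s : Int), op) = some ((s : Int) + 1) := by simp [hop]
      rw [List.filterMap_cons]
      simp only [hf]
      rw [hcast, ih (s + 1)]
      simp only [pvRefSplits, if_neg hop, List.map_cons, List.map_map]
      apply congrArg₂ List.cons
      · push_cast; ring
      · apply List.map_congr_left
        intro k _
        simp only [Function.comp_apply]
        congr 1
        omega

lemma pvZip_sliceGroups (full : List String) : ∀ (bs : List Int) (a : Int),
    (((a :: bs).zip bs).map (fun q => PySem.List.slice full (some q.1) (some q.2)))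
    = pvSliceGroups full a bs := by
  intro bs
  induction bs with
  | nil => intro a; rfl
  | cons b bs ih => intro a; simp only [List.zip_cons_cons, List.map_cons, pvSliceGroups, ih]

lemma pvB_groups (ops : List String) : ∀ (ws init pre full : List String),
    ws.length = ops.length → full = init ++ pre ++ ws →
    pvSliceGroups full (init.length : Int)
      ((pvRefSplits ops).map (fun k => ((init.length + pre.length + k : Nat) : Int))
        ++ [(full.length : Int)])
    = pvRefGroups pre ops ws := by
  induction ops with
  | nil =>
    intro ws init pre full hl hfull
    cases ws with
    | cons w ws => simp at hl
    | nil =>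
      subst hfull
      simp only [pvRefSplits, List.map_nil, List.nil_append, pvSliceGroups, pvRefGroups,
        List.append_nil]
      rw [PySem.List.slice_natCast]
      rw [List.drop_left, List.length_append, Nat.add_sub_cancel_left, List.take_length]
  | cons op ops ih =>
    intro ws init pre full hl hfull
    cases ws with
    | nil => simp at hl
    | cons w ws =>
      have hl' : ws.length = ops.length := by simpa using hl
      by_cases hop : op = "and"
      · subst hop
        simp only [pvRefSplits, if_true, List.map_map]
        have hmap : ((pvRefSplits ops).map ((fun k => ((init.length + pre.length + k : Nat) : Int)) ∘ (· + 1)))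
            = (pvRefSplits ops).map (fun k => ((init.length + (pre ++ [w]).length + k : Nat) : Int)) := by
          apply List.map_congr_left
          intro k _
          simp only [Function.comp_apply, List.length_append, List.length_cons, List.length_nil]
          congr 1
          omega
        rw [hmap, ih ws init (pre ++ [w]) full hl' (by subst hfull; simp)]
        simp [pvRefGroups]
      · simp only [pvRefSplits, if_neg hop, List.map_cons, List.map_map, List.cons_append]
        rw [pvSliceGroups]
        have hfirst : PySem.List.slice full (some (init.length : Int))
            (some ((init.length + pre.length + 0 : Nat) : Int)) = pre := by
          subst hfull
          rw [PySem.List.slice_natCast, Nat.add_zero, Nat.add_sub_cancel_left]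
          rw [List.append_assoc, List.drop_left, List.take_left]
        have hbound : ((init.length + pre.length + 0 : Nat) : Int) = (((init ++ pre).length : Nat) : Int) := by
          simp
        have hmap : ((pvRefSplits ops).map ((fun k => ((init.length + pre.length + k : Nat) : Int)) ∘ (· + 1)))
            = (pvRefSplits ops).map (fun k => (((init ++ pre).length + [w].length + k : Nat) : Int)) := by
          apply List.map_congr_left
          intro k _
          simp only [Function.comp_apply, List.length_append, List.length_cons, List.length_nil]
          congr 1
          omega
        rw [hfirst, hbound, hmap,
          ih ws (init ++ pre) [w] full hl' (by subst hfull; simp)]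
        simp [pvRefGroups, hop]

lemma pvA_simple_tail (ops : List String) : ∀ (ws fullops : List String) (s : Nat),
    ws.length = ops.length → fullops.drop s = ops →
    (PySem.List.enumerate ws ((s : Int) + 1)).map (fun p =>
        if p.1 == 0 then p.2
        else PySem.Str.join " " [PySem.List.pyGetD fullops (p.1 - 1) "", p.2])
    = (ops.zip ws).map (fun q => PySem.Str.join " " [q.1, q.2]) := by
  induction ops with
  | nil =>
    intro ws fullops s hl hd
    cases ws with
    | nil => rfl
    | cons w ws => simp at hl
  | cons op ops ih =>
    intro ws fullops s hl hd
    cases ws with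
    | nil => simp at hl
    | cons w ws =>
      have hl' : ws.length = ops.length := by simpa using hl
      have hd' : fullops.drop (s + 1) = ops := by
        have h1 : fullops.drop (s + 1) = (fullops.drop s).drop 1 := by
          rw [List.drop_drop, Nat.add_comm]
        rw [h1, hd]
        rfl
      have hne : (((s : Int) + 1) == 0) = false := by
        simp only [beq_eq_false_iff_ne, ne_eq]
        omega
      have hget : PySem.List.pyGetD fullops ((s : Int) + 1 - 1) "" = op := by
        have h0 : fullops[s]? = some op := by
          have h1 : (fullops.drop s)[0]? = fullops[s + 0]? := List.getElem?_drop
          rw [hd] at h1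
          simpa using h1.symm
        have hc : (s : Int) + 1 - 1 = ((s : Nat) : Int) := by ring
        rw [hc, PySem.List.pyGetD_natCast]
        simp [List.getD_eq_getElem?_getD, h0]
      rw [PySem.List.enumerate_cons, List.map_cons, List.zip_cons_cons, List.map_cons]
      rw [hne]
      simp only [Bool.false_eq_true, if_false, hget]
      have hcast : (s : Int) + 1 + 1 = ((s + 1 : Nat) : Int) + 1 := by push_cast; ring
      rw [hcast, ih ws fullops (s + 1) hl' hd']

lemma pvJoinGlue (sp a b : List Char) (rest : List (List Char)) :
    PySem.Chars.join sp ((a ++ sp ++ b) :: rest) = a ++ sp ++ PySem.Chars.join sp (b :: rest) := by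
  cases rest with
  | nil => simp [PySem.Chars.join_singleton]
  | cons c r =>
    rw [PySem.Chars.join_cons_cons, PySem.Chars.join_cons_cons]
    simp [List.append_assoc]

lemma pvCharsJoinFlat (sp : List Char) (l : List (List Char × List Char)) : ∀ (h : List Char),
    PySem.Chars.join sp (h :: l.map (fun q => q.1 ++ sp ++ q.2))
    = PySem.Chars.join sp (h :: l.flatMap (fun q => [q.1, q.2])) := by
  induction l with
  | nil => intro h; rfl
  | cons q l ih =>
    intro h
    simp only [List.map_cons, List.flatMap_cons, List.cons_append, List.nil_append]
    rw [PySem.Chars.join_cons_cons, pvJoinGlue, ih q.2,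
        PySem.Chars.join_cons_cons, PySem.Chars.join_cons_cons]

lemma pvJoinFlat (l : List (String × String)) (h : String) :
    PySem.Str.join " " (h :: l.map (fun q => PySem.Str.join " " [q.1, q.2]))
    = PySem.Str.join " " (h :: l.flatMap (fun q => [q.1, q.2])) := by
  simp only [PySem.Str.join]
  apply congrArg String.ofList
  simp only [List.map_cons, List.map_map, List.map_flatMap, List.map_nil]
  have h2 := pvCharsJoinFlat " ".toList (l.map (fun q => (q.1.toList, q.2.toList))) h.toList
  simp only [List.map_map, List.flatMap_map] at h2
  rw [← h2]
  apply congrArg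
  apply congrArg (List.cons h.toList)
  apply List.map_congr_left
  intro q _
  simp [PySem.Chars.join_cons_cons, PySem.Chars.join_singleton]

-- ===== VERDICT (by name: the statement is the Claim_ definition above) =====
theorem build_logical_expression_spec : Claim_equal_build_logical_expression := by
  intro ops words _ hpre
  unfold Spec_build_logical_expression
  unfold Pre_build_logical_expression at hpre
  cases words with
  | nil => simp at hpre
  | cons w ws =>
  have hl : ws.length = ops.length := by simpa using hpre
  simp only [build_logical_expression, build_logical_expression_alt,
    PySem.List.pyGetD_zero_cons, PySem.List.len_eq, List.tail_cons,
    List.singleton_append, List.tail_cons]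
  -- groups on the A side
  have hA := pvA_fold ops ws (w :: ws) 0 [] [w] hl rfl
  simp only [Nat.cast_zero, List.nil_append] at hA
  rw [hA]
  -- groups on the B side
  have hF := pvB_filterMap ops 0
  simp only [Nat.cast_zero] at hF
  simp only [List.cons_append, List.tail_cons]
  rw [hF, pvZip_sliceGroups]
  have hB := pvB_groups ops ws [] [w] (w :: ws) hl rfl
  have hmap : (pvRefSplits ops).map (fun k => ((0 + k + 1 : Nat) : Int))
      = (pvRefSplits ops).map (fun k => ((([] : List String).length + [w].length + k : Nat) : Int)) := by
    apply List.map_congr_left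
    intro k _
    congr 1
    simp
    omega
  have hz : ((([] : List String).length : Nat) : Int) = 0 := by simp
  rw [hz] at hB
  rw [hmap, hB]
  -- the two components
  refine Prod.ext ?_ ?_
  · -- structured expression
    simp only [List.length_map]
    by_cases hg : (pvRefGroups [w] ops ws).length = 1
    · rcases gs : pvRefGroups [w] ops ws with _ | ⟨g, t⟩
      · rw [gs] at hg; simp at hg
      · rw [gs] at hg
        rcases t with _ | ⟨g2, t⟩
        · simp [pvRender_enc]
        · simp at hg
    · have hbeq : ((pvRefGroups [w] ops ws).length == 1) = false := by
        simpa using hg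
      rw [hbeq]
      simp only [Bool.false_eq_true, if_false, List.map_map]
      have : (pvRefGroups [w] ops ws).map (pvRenderGroup ∘ pvEncGroup)
          = (pvRefGroups [w] ops ws).map pvFmtGroup :=
        List.map_congr_left (fun g _ => pvRender_enc g)
      rw [this]
  · -- simple expression
    rw [PySem.List.enumerate_cons, List.map_cons]
    simp only [show ((0 : Int) == 0) = true from rfl, if_true]
    have hT := pvA_simple_tail ops ws ops 0 hl rfl
    simp only [Nat.cast_zero] at hT
    rw [hT]
    rw [PySem.List.foldl_append_eq_flatMap (fun q : String × String => [q.1, q.2]) (ops.zip ws) [w]]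
    rw [List.singleton_append]
    exact pvJoinFlat (ops.zip ws) w
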